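-- pv_equiv track=rewrite | github.com/jbayardo/dip-tp2 | src/jj.py | dc_coding
-- ===== SOURCE A (Python) =====
-- def zigzag_indices(n, m):
--     """
--     Return a permutation of the list of all indices (i, j) with
--     0 <= i < n and 0 <= j < n, according to the diagonal walk.
--     """
--     i, j = 0, 0
--     yield i, j
--     while (i, j) != (n - 1, m - 1):
--         if j < m - 1:
--             j += 1
--         else:
--             i += 1
--         yield i, j
--         while j > 0 and i < n - 1:
--             i += 1
--             j -= 1
--             yield i, j
--         if i < n - 1:
--             i += 1
--         else:
--             j += 1
--         yield i, j
--         while i > 0 and j < m - 1: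
--             i -= 1
--             j += 1
--             yield i, j
--
-- def dc_coding(dct_matrix_quantized):
--     "Encode the matrix of blocks using DC coding representation."
--
--     def dc_coding_block(previous_dc, block):
--         width = len(block)
--         height = len(block[0])
--         block_dc = []
--         for i, j in zigzag_indices(width, height):
--             value = block[i][j]
--             if (i, j) == (0, 0):
--                 value -= previous_dc
--             block_dc.append(value)
--         return block_dc
--
--     dct_matrix_dc = []
--     previous_dc = 0
--     for ii in range(len(dct_matrix_quantized)):
--         for jj in range(len(dct_matrix_quantized)):
--             dct_matrix_dc.extend(
--                 dc_coding_block(previous_dc, dct_matrix_quantized[ii][jj])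
--             )
--             previous_dc = dct_matrix_quantized[ii][jj][0][0]
--     return dct_matrix_dc
-- ===== SOURCE B (Python) =====
-- def dc_coding(dct_matrix_quantized):
--     "Encode the matrix of blocks using DC coding representation."
--
--     def zigzag_indices(n, m):
--         # diagonal grouping: diagonal d holds (i, d-i); even d runs i downward, odd d upward
--         for d in range(n + m - 1):
--             lo = max(0, d - m + 1)
--             hi = min(d, n - 1)
--             rng = range(lo, hi + 1)
--             if d % 2 == 0:
--                 rng = reversed(rng)
--             for i in rng:
--                 yield i, d - i
--
--     out = []
--     previous_dc = 0
--     size = len(dct_matrix_quantized)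
--     for ii in range(size):
--         for jj in range(size):
--             block = dct_matrix_quantized[ii][jj]
--             enc = [block[i][j] for i, j in zigzag_indices(len(block), len(block[0]))]
--             enc[0] -= previous_dc
--             out.extend(enc)
--             previous_dc = block[0][0]
--     return out
-- ===== Notes on version B (the rewrite author's own statement) =====
-- stated objective: simpler
-- what changed: Replaces the stateful step-by-step zigzag walk (an intricate state machine of nested whiles) with closed-form diagonal grouping: for each diagonal d emit (i, d-i) with i descending for even d and ascending for odd d, and apply the DC subtraction to the first emitted element instead of testing (i,j)==(0,0) on every step.
-- crash fix: On inputs containing a block whose width+height is odd (an otherwise well-formed grid), A's zigzag walk steps outside the block and raises IndexError, while B returns the diagonal-order encoding; Pre_ also excludes the other shapes on which both A and B raise IndexError (empty blocks, block rows shorter than the first row, grid rows shorter than the grid). — e.g. on dc_coding([[[[1, 2]]]]): A raises IndexError, B returns [1, 2]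
import Mathlib
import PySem

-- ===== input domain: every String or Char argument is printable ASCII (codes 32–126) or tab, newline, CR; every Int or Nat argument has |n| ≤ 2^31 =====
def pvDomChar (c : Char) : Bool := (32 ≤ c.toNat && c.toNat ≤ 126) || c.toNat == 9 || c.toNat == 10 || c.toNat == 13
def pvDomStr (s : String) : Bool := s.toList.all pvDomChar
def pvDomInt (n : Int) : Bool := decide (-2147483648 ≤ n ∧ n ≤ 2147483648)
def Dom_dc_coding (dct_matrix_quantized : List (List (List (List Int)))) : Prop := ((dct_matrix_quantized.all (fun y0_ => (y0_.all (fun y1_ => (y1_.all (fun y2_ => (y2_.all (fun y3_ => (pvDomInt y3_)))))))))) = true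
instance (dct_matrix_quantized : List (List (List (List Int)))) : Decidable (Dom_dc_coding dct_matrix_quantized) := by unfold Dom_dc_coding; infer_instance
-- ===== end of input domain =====

-- B replaces A's stateful zigzag walk by closed-form diagonal grouping (simpler); equal wherever A returns.

-- ===== PORT A =====
-- inner `while j > 0 and i < n - 1` of A's zigzag_indices
def zzDownLeft (n : Int) (i j : Int) : List (Int × Int) × Int × Int :=
  if h : 0 < j ∧ i < n - 1 then
    let p := zzDownLeft n (i + 1) (j - 1)
    ((i + 1, j - 1) :: p.1, p.2)
  else ([], i, j)
termination_by j.toNat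
decreasing_by omega

-- inner `while i > 0 and j < m - 1` of A's zigzag_indices
def zzUpRight (m : Int) (i j : Int) : List (Int × Int) × Int × Int :=
  if h : 0 < i ∧ j < m - 1 then
    let p := zzUpRight m (i - 1) (j + 1)
    ((i - 1, j + 1) :: p.1, p.2)
  else ([], i, j)
termination_by (m - 1 - j).toNat
decreasing_by omega

-- outer `while (i, j) != (n - 1, m - 1)` of A's zigzag_indices, with fuel for totality
def zzLoop (n m : Int) : Nat → Int → Int → List (Int × Int)
  | 0, _, _ => []
  | fuel + 1, i, j =>
    if i = n - 1 ∧ j = m - 1 then []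
    else
      let s1 : Int × Int := if j < m - 1 then (i, j + 1) else (i + 1, j)
      let r1 := zzDownLeft n s1.1 s1.2
      let s2 : Int × Int := if r1.2.1 < n - 1 then (r1.2.1 + 1, r1.2.2) else (r1.2.1, r1.2.2 + 1)
      let r2 := zzUpRight m s2.1 s2.2
      s1 :: r1.1 ++ s2 :: r2.1 ++ zzLoop n m fuel r2.2.1 r2.2.2

def zigzagA (n m : Int) : List (Int × Int) :=
  (0, 0) :: zzLoop n m (n.toNat * m.toNat) 0 0

-- dc_coding_block of A
def dcBlockA (previous_dc : Int) (block : List (List Int)) : List Int :=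
  let width : Int := block.length
  let height : Int := (PySem.List.pyGetD block 0 []).length
  (zigzagA width height).foldl (fun acc ij =>
    let value := PySem.List.pyGetD (PySem.List.pyGetD block ij.1 []) ij.2 0
    acc ++ [if ij = ((0 : Int), (0 : Int)) then value - previous_dc else value]) []

def dc_coding (dct_matrix_quantized : List (List (List (List Int)))) : List Int :=
  ((PySem.List.pyRange 0 dct_matrix_quantized.length 1).foldl (fun st ii =>
    (PySem.List.pyRange 0 dct_matrix_quantized.length 1).foldl (fun st jj =>
      let block := PySem.List.pyGetD (PySem.List.pyGetD dct_matrix_quantized ii []) jj []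
      (st.1 ++ dcBlockA st.2 block,
       PySem.List.pyGetD (PySem.List.pyGetD block 0 []) 0 0)) st)
    ([], 0)).1

-- ===== PORT B =====
-- one diagonal of B's generator: (i, d - i), i descending for even d, ascending for odd d
def diagL (n m d : Int) : List (Int × Int) :=
  let lo := max 0 (d - m + 1)
  let hi := min d (n - 1)
  let r := PySem.List.pyRange lo (hi + 1) 1
  (if d % 2 = 0 then r.reverse else r).map (fun i => (i, d - i))

def zigzagB (n m : Int) : List (Int × Int) :=
  (PySem.List.pyRange 0 (n + m - 1) 1).flatMap (diagL n m)

-- per-block body of B's inner loop; on [] Python's enc[0] would raise (unreachable under Pre_)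
def dcBlockB (previous_dc : Int) (block : List (List Int)) : List Int :=
  let enc := (zigzagB block.length (PySem.List.pyGetD block 0 []).length).map
    (fun ij => PySem.List.pyGetD (PySem.List.pyGetD block ij.1 []) ij.2 0)
  match enc with
  | [] => []
  | x :: rest => (x - previous_dc) :: rest

def dc_coding_alt (dct_matrix_quantized : List (List (List (List Int)))) : List Int :=
  ((PySem.List.pyRange 0 dct_matrix_quantized.length 1).foldl (fun st ii =>
    (PySem.List.pyRange 0 dct_matrix_quantized.length 1).foldl (fun st jj =>
      let block := PySem.List.pyGetD (PySem.List.pyGetD dct_matrix_quantized ii []) jj []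
      (st.1 ++ dcBlockB st.2 block,
       PySem.List.pyGetD (PySem.List.pyGetD block 0 []) 0 0)) st)
    ([], 0)).1

-- ===== PRECONDITION & SPEC =====
-- A block is usable by A: nonempty, nonempty first row, width+height EVEN (odd parity makes A's
-- walk leave the block and raise IndexError), and every row at least as long as the first row.
def GoodBlock (b : List (List Int)) : Bool :=
  decide (0 < b.length) && decide (0 < (b.headD []).length) &&
    decide ((b.length + (b.headD []).length) % 2 = 0) &&
    b.all (fun r => decide ((b.headD []).length ≤ r.length))

-- Pre_ excludes exactly the inputs on which A raises IndexError: grid rows shorter than the grid,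
-- and blocks in the scanned square that are empty, ragged below the first row, or of odd width+height.
def Pre_dc_coding (dct_matrix_quantized : List (List (List (List Int)))) : Prop :=
  ∀ row ∈ dct_matrix_quantized,
    dct_matrix_quantized.length ≤ row.length ∧
    ∀ b ∈ row.take dct_matrix_quantized.length, GoodBlock b = true

instance (dct_matrix_quantized : List (List (List (List Int)))) : Decidable (Pre_dc_coding dct_matrix_quantized) := by
  unfold Pre_dc_coding; infer_instance

def pvWitness_dc_coding : List (List (List (List Int))) := [[[[1, 2], [3, 4]]]]

-- On inputs whose blocks are well-shaped except that some block has odd width+height, A raises IndexError while B returns the diagonal-order encoding.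
def Raises_dc_coding (dct_matrix_quantized : List (List (List (List Int)))) : Prop :=
  (∀ row ∈ dct_matrix_quantized,
    dct_matrix_quantized.length ≤ row.length ∧
    ∀ b ∈ row.take dct_matrix_quantized.length,
      0 < b.length ∧ 0 < (b.headD []).length ∧ ∀ r ∈ b, (b.headD []).length ≤ r.length) ∧
  (∃ row ∈ dct_matrix_quantized, ∃ b ∈ row.take dct_matrix_quantized.length,
      (b.length + (b.headD []).length) % 2 = 1)

instance (dct_matrix_quantized : List (List (List (List Int)))) : Decidable (Raises_dc_coding dct_matrix_quantized) := by
  unfold Raises_dc_coding; infer_instance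

def pvRaiseWitness_dc_coding : List (List (List (List Int))) := [[[[1, 2]]]]
def pvRaiseWitnessOut_dc_coding : List Int := [1, 2]

def Spec_dc_coding (dct_matrix_quantized : List (List (List (List Int)))) (out : List Int) : Prop := out = dc_coding_alt dct_matrix_quantized
instance (dct_matrix_quantized : List (List (List (List Int)))) (out : List Int) : Decidable (Spec_dc_coding dct_matrix_quantized out) := by unfold Spec_dc_coding; infer_instance

-- ===== CLAIM (what is proved, stated in full; the proofs are below) =====
def Claim_equal_dc_coding : Prop := ∀ (dct_matrix_quantized : List (List (List (List Int)))), Dom_dc_coding dct_matrix_quantized → Pre_dc_coding dct_matrix_quantized → Spec_dc_coding dct_matrix_quantized (dc_coding dct_matrix_quantized)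

def Claim_raises_dc_coding : Prop := (∀ (dct_matrix_quantized : List (List (List (List Int)))), Dom_dc_coding dct_matrix_quantized → Raises_dc_coding dct_matrix_quantized → ¬ Pre_dc_coding dct_matrix_quantized) ∧ (Dom_dc_coding (pvRaiseWitness_dc_coding) ∧ Raises_dc_coding (pvRaiseWitness_dc_coding) ∧ dc_coding_alt (pvRaiseWitness_dc_coding) = pvRaiseWitnessOut_dc_coding)

-- ===== LEMMAS AND PROOFS =====
def tailB (n m d : Int) : List (Int × Int) :=
  (PySem.List.pyRange (d + 1) (n + m - 1) 1).flatMap (diagL n m)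

theorem zzDownLeft_run (n m s : Int) (hn : 1 ≤ n) (hm : 1 ≤ m) (hs0 : 0 ≤ s)
    (hs1 : s ≤ n + m - 2) :
    ∀ i : Int, max 0 (s - m + 1) ≤ i → i ≤ min s (n - 1) →
    zzDownLeft n i (s - i) =
      ((PySem.List.pyRange (i + 1) (min s (n - 1) + 1) 1).map (fun t => (t, s - t)),
       (min s (n - 1), s - min s (n - 1))) := by
  have key : ∀ N : Nat, ∀ i : Int, (min s (n - 1) - i).toNat ≤ N →
      max 0 (s - m + 1) ≤ i → i ≤ min s (n - 1) →
      zzDownLeft n i (s - i) =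
        ((PySem.List.pyRange (i + 1) (min s (n - 1) + 1) 1).map (fun t => (t, s - t)),
         (min s (n - 1), s - min s (n - 1))) := by
    intro N
    induction N with
    | zero =>
      intro i hN h1 h2
      have hi : i = min s (n - 1) := by omega
      rw [zzDownLeft, dif_neg (by omega)]
      rw [PySem.List.pyRange_one_eq_nil (by omega)]
      simp [hi]
    | succ N ih =>
      intro i hN h1 h2
      rcases eq_or_lt_of_le h2 with hi | hi
      · rw [zzDownLeft, dif_neg (by omega)]
        rw [PySem.List.pyRange_one_eq_nil (by omega)]
        simp [hi]
      · have hc : 0 < s - i ∧ i < n - 1 := by omega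
        rw [zzDownLeft, dif_pos hc]
        have hrec := ih (i + 1) (by omega) (by omega) (by omega)
        have he : s - (i + 1) = s - i - 1 := by ring
        rw [he] at hrec
        rw [hrec]
        rw [PySem.List.pyRange_one_cons (by omega : i + 1 < min s (n - 1) + 1)]
        simp only [List.map_cons]
        rw [he]
  intro i h1 h2
  exact key _ i le_rfl h1 h2

theorem zzUpRight_run (n m s : Int) (hn : 1 ≤ n) (hm : 1 ≤ m) (hs0 : 0 ≤ s)
    (hs1 : s ≤ n + m - 2) :
    ∀ i : Int, max 0 (s - m + 1) ≤ i → i ≤ min s (n - 1) →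
    zzUpRight m i (s - i) =
      (((PySem.List.pyRange (max 0 (s - m + 1)) i 1).reverse).map (fun t => (t, s - t)),
       (max 0 (s - m + 1), s - max 0 (s - m + 1))) := by
  have key : ∀ N : Nat, ∀ i : Int, (i - max 0 (s - m + 1)).toNat ≤ N →
      max 0 (s - m + 1) ≤ i → i ≤ min s (n - 1) →
      zzUpRight m i (s - i) =
        (((PySem.List.pyRange (max 0 (s - m + 1)) i 1).reverse).map (fun t => (t, s - t)),
         (max 0 (s - m + 1), s - max 0 (s - m + 1))) := by
    intro N
    induction N with
    | zero =>
      intro i hN h1 h2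
      have hi : i = max 0 (s - m + 1) := by omega
      rw [zzUpRight, dif_neg (by omega)]
      rw [PySem.List.pyRange_one_eq_nil (by omega)]
      simp [hi]
    | succ N ih =>
      intro i hN h1 h2
      rcases eq_or_lt_of_le h1 with hi | hi
      · rw [zzUpRight, dif_neg (by omega)]
        rw [PySem.List.pyRange_one_eq_nil (by omega)]
        simp [hi.symm]
      · have hc : 0 < i ∧ s - i < m - 1 := by omega
        rw [zzUpRight, dif_pos hc]
        have hrec := ih (i - 1) (by omega) (by omega) (by omega)
        have he : s - (i - 1) = s - i + 1 := by ring
        rw [he] at hrec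
        rw [hrec]
        have hsplit := PySem.List.pyRange_one_succ_right (a := max 0 (s - m + 1)) (b := i - 1) (by omega)
        rw [show i - 1 + 1 = i by ring] at hsplit
        rw [hsplit, List.reverse_append]
        simp only [List.reverse_singleton, List.singleton_append, List.map_cons]
        rw [he]
  intro i h1 h2
  exact key _ i le_rfl h1 h2

theorem zzLoop_eq_tailB (n m : Int) (hn : 1 ≤ n) (hm : 1 ≤ m) (hpar : (n + m) % 2 = 0) :
    ∀ (k fuel : Nat) (d : Int), d = n + m - 2 - 2 * k → 0 ≤ d → k ≤ fuel →
    zzLoop n m fuel (max 0 (d - m + 1)) (min d (m - 1)) = tailB n m d := by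
  intro k
  induction k with
  | zero =>
    intro fuel d hd hd0 hf
    have h1 : max 0 (d - m + 1) = n - 1 := by omega
    have h2 : min d (m - 1) = m - 1 := by omega
    rw [h1, h2]
    have ht : tailB n m d = [] := by
      unfold tailB
      rw [PySem.List.pyRange_one_eq_nil (by omega)]
      rfl
    rw [ht]
    cases fuel with
    | zero => rw [zzLoop]
    | succ f => rw [zzLoop, if_pos ⟨rfl, rfl⟩]
  | succ k ih =>
    intro fuel d hd hd0 hf
    obtain ⟨f, rfl⟩ : ∃ f, fuel = f + 1 := ⟨fuel - 1, by omega⟩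
    have hd4 : d ≤ n + m - 4 := by omega
    have hpar' : d % 2 = 0 := by omega
    rw [zzLoop, if_neg (by omega)]
    have hs1 : (if min d (m - 1) < m - 1 then (max 0 (d - m + 1), min d (m - 1) + 1)
        else (max 0 (d - m + 1) + 1, min d (m - 1)))
        = ((max 0 (d - m + 2), d + 1 - max 0 (d - m + 2)) : Int × Int) := by
      split_ifs <;> (rw [Prod.ext_iff]; constructor <;> (simp only []; omega))
    rw [hs1]
    have hr1 := zzDownLeft_run n m (d + 1) hn hm (by omega) (by omega)
      (max 0 (d - m + 2)) (by omega) (by omega)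
    simp only [] at hr1 ⊢
    rw [hr1]
    dsimp only
    have hs2 : (if min (d + 1) (n - 1) < n - 1 then
          (min (d + 1) (n - 1) + 1, d + 1 - min (d + 1) (n - 1))
        else (min (d + 1) (n - 1), d + 1 - min (d + 1) (n - 1) + 1))
        = ((min (d + 2) (n - 1), d + 2 - min (d + 2) (n - 1)) : Int × Int) := by
      split_ifs <;> (rw [Prod.ext_iff]; constructor <;> (dsimp only; omega))
    rw [hs2]
    dsimp only
    have hr2 := zzUpRight_run n m (d + 2) hn hm (by omega) (by omega)
      (min (d + 2) (n - 1)) (by omega) (by omega)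
    rw [show d + 2 - min (d + 2) (n - 1) = d + 2 - min (d + 2) (n - 1) from rfl] at hr2
    rw [hr2]
    dsimp only
    rw [show d + 2 - max 0 (d + 2 - m + 1) = min (d + 2) (m - 1) from by omega,
        show (max 0 (d + 2 - m + 1)) = max 0 ((d + 2) - m + 1) from rfl]
    rw [ih f (d + 2) (by omega) (by omega) (by omega)]
    have htail : tailB n m d = diagL n m (d + 1) ++ (diagL n m (d + 2) ++ tailB n m (d + 2)) := by
      unfold tailB
      rw [PySem.List.pyRange_one_cons (by omega), PySem.List.pyRange_one_cons (by omega)]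
      rw [List.flatMap_cons, List.flatMap_cons]
      rw [show d + 1 + 1 = d + 2 from by ring]
    have hdiag1 : diagL n m (d + 1) = (max 0 (d - m + 2), d + 1 - max 0 (d - m + 2)) ::
        List.map (fun t => (t, d + 1 - t))
          (PySem.List.pyRange (max 0 (d - m + 2) + 1) (min (d + 1) (n - 1) + 1)) := by
      unfold diagL
      dsimp only
      rw [if_neg (by omega)]
      rw [show d + 1 - m + 1 = d - m + 2 from by ring]
      rw [PySem.List.pyRange_one_cons (by omega)]
      simp only [List.map_cons]
    have hdiag2 : diagL n m (d + 2) = (min (d + 2) (n - 1), d + 2 - min (d + 2) (n - 1)) ::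
        List.map (fun t => (t, d + 2 - t))
          (PySem.List.pyRange (max 0 (d + 2 - m + 1)) (min (d + 2) (n - 1))).reverse := by
      unfold diagL
      dsimp only
      rw [if_pos (by omega)]
      rw [PySem.List.pyRange_one_succ_right (by omega)]
      rw [List.reverse_append]
      simp only [List.reverse_singleton, List.singleton_append, List.map_cons]
    rw [htail, hdiag1, hdiag2]
    simp only [List.cons_append, List.append_assoc]

theorem zigzagB_cons (n m : Int) (hn : 1 ≤ n) (hm : 1 ≤ m) :
    zigzagB n m = ((0, 0) : Int × Int) :: tailB n m 0 := by
  unfold zigzagB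
  rw [PySem.List.pyRange_one_cons (by omega), List.flatMap_cons]
  have h0 : diagL n m 0 = [((0, 0) : Int × Int)] := by
    unfold diagL
    dsimp only
    rw [if_pos (by omega)]
    rw [show max 0 (0 - m + 1) = 0 from by omega, show min 0 (n - 1) = 0 from by omega]
    rw [show (0 + 1 : Int) = 0 + 1 from rfl, PySem.List.pyRange_one_singleton]
    rfl
  rw [h0]
  rfl

theorem zigzagA_eq_zigzagB (n m : Int) (hn : 1 ≤ n) (hm : 1 ≤ m) (hpar : (n + m) % 2 = 0) :
    zigzagA n m = zigzagB n m := by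
  obtain ⟨k, hk⟩ : ∃ k : Nat, (0 : Int) = n + m - 2 - 2 * k := ⟨((n + m - 2) / 2).toNat, by omega⟩
  have e : ((n.toNat * m.toNat : Nat) : Int) = n * m := by
    push_cast
    rw [Int.toNat_of_nonneg (by omega), Int.toNat_of_nonneg (by omega)]
  have hfuel : k ≤ n.toNat * m.toNat := by
    have h2 : (k : Int) ≤ ((n.toNat * m.toNat : Nat) : Int) := by rw [e]; nlinarith
    exact_mod_cast h2
  have hmain := zzLoop_eq_tailB n m hn hm hpar k (n.toNat * m.toNat) 0 hk (by omega) hfuel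
  rw [show max 0 (0 - m + 1) = 0 from by omega, show min 0 (m - 1) = 0 from by omega] at hmain
  rw [zigzagB_cons n m hn hm]
  unfold zigzagA
  rw [hmain]

theorem not_mem_tailB (n m : Int) : ((0, 0) : Int × Int) ∉ tailB n m 0 := by
  intro h
  unfold tailB at h
  rw [List.mem_flatMap] at h
  obtain ⟨d, hd, hmem⟩ := h
  rw [PySem.List.mem_pyRange_one] at hd
  unfold diagL at hmem
  dsimp only at hmem
  split_ifs at hmem <;>
    simp only [List.mem_map, List.mem_reverse, PySem.List.mem_pyRange_one, Prod.mk.injEq] at hmem <;>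
    obtain ⟨i, hi, h1, h2⟩ := hmem <;> omega

theorem dcBlock_eq (previous_dc : Int) (b : List (List Int)) (hb : GoodBlock b = true) :
    dcBlockA previous_dc b = dcBlockB previous_dc b := by
  simp only [GoodBlock, Bool.and_eq_true, decide_eq_true_eq, List.all_eq_true] at hb
  obtain ⟨⟨⟨hb1, hb2⟩, hb3⟩, -⟩ := hb
  have hb0 : PySem.List.pyGetD b 0 ([] : List Int) = b.headD [] := by
    rw [PySem.List.pyGetD_zero]; cases b <;> rfl
  have hzz : zigzagA (b.length : Int) ((PySem.List.pyGetD b 0 ([] : List Int)).length : Int)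
      = zigzagB (b.length : Int) ((PySem.List.pyGetD b 0 ([] : List Int)).length : Int) := by
    apply zigzagA_eq_zigzagB
    · omega
    · rw [hb0]; omega
    · rw [hb0]; omega
  unfold dcBlockA dcBlockB
  dsimp only
  rw [hzz]
  rw [zigzagB_cons _ _ (by omega) (by rw [hb0]; omega)]
  rw [PySem.List.foldl_append_singleton_eq_map]
  simp only [List.nil_append, List.map_cons]
  congr 1
  apply List.map_congr_left
  intro ij hij
  rw [if_neg]
  intro hij0
  rw [hij0] at hij
  exact not_mem_tailB _ _ hij

theorem dc_final (q : List (List (List (List Int)))) (hpre : Pre_dc_coding q) :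
    dc_coding q = dc_coding_alt q := by
  unfold dc_coding dc_coding_alt
  congr 1
  apply PySem.List.foldl_congr_mem
  intro st ii hii
  apply PySem.List.foldl_congr_mem
  intro st' jj hjj
  rw [PySem.List.mem_pyRange_one] at hii hjj
  dsimp only
  have hrow : PySem.List.pyGetD q ii [] = q[ii.toNat]'(by omega) :=
    PySem.List.pyGetD_eq_getElem q [] (by omega) (by omega)
  have hmem : q[ii.toNat]'(by omega) ∈ q := List.getElem_mem _
  obtain ⟨hlen, hgood⟩ := hpre _ hmem
  have hblk : PySem.List.pyGetD (PySem.List.pyGetD q ii []) jj []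
      = (q[ii.toNat]'(by omega))[jj.toNat]'(by omega) := by
    rw [hrow]
    exact PySem.List.pyGetD_eq_getElem _ [] (by omega) (by omega)
  have hlt : jj.toNat < ((q[ii.toNat]'(by omega)).take q.length).length := by
    rw [List.length_take]; omega
  have hbmem : (q[ii.toNat]'(by omega))[jj.toNat]'(by omega)
      ∈ (q[ii.toNat]'(by omega)).take q.length := by
    have hg := List.getElem_take (xs := q[ii.toNat]'(by omega)) (j := q.length)
      (i := jj.toNat) (h := hlt)
    exact hg ▸ List.getElem_mem hlt
  rw [hblk, dcBlock_eq _ _ (hgood _ hbmem)]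

-- ===== VERDICT (by name: the statement is the Claim_ definition above) =====
theorem dc_coding_spec : Claim_equal_dc_coding := by
  intro q _ hpre
  unfold Spec_dc_coding
  exact dc_final q hpre

theorem dc_coding_raises : Claim_raises_dc_coding := by
  unfold Claim_raises_dc_coding
  refine ⟨?_, by decide⟩
  intro q _ hr hpre
  obtain ⟨-, row, hrow, b, hb, hodd⟩ := hr
  have hg := (hpre row hrow).2 b hb
  simp only [GoodBlock, Bool.and_eq_true, decide_eq_true_eq] at hg
  have := hg.1.2
  omega

-- self-check: the crash witness indeed lies outside Pre_ (via the first half of dc_coding_raises)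
theorem pvRaiseWitness_ok : ¬ Pre_dc_coding pvRaiseWitness_dc_coding :=
  dc_coding_raises.1 pvRaiseWitness_dc_coding dc_coding_raises.2.1 dc_coding_raises.2.2.1
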